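-- pv_equiv track=rewrite | github.com/yusufvo/PAI-Assignment-1 | Q1.py | findFrequentPairs
-- ===== SOURCE A (Python) =====
-- from itertools import combinations
--
-- def findFrequentPairs(transactionLog):
--     orders = {}
--     for transaction in transactionLog:
--         order = transaction['orderId']
--         product = transaction['productId']
--
--         if order not in orders:
--             orders[order] = {product}
--         else:
--             orders[order].add(product)
--
--     pair_counts = {}
--
--     for product_set in orders.values():
--
--         if len(product_set) < 2:
--             continue
--
--         sorted_products = sorted(list(product_set))
--
--         pairs = combinations(sorted_products, 2)
--
--         for pair in pairs:
--             pair_counts[pair] = pair_counts.get(pair, 0) + 1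
--
--     return pair_counts
-- ===== SOURCE B (Python) =====
-- from itertools import combinations
--
-- def findFrequentPairs(transactionLog):
--     # Vertical (Eclat-style) counting: an inverted index productId -> set of orderIds
--     # (tidsets); each candidate pair is counted as the size of a tidset intersection.
--     orders = {}   # orderId -> set of productIds
--     tidsets = {}  # productId -> set of orderIds
--     for transaction in transactionLog:
--         order = transaction['orderId']
--         product = transaction['productId']
--         orders.setdefault(order, set()).add(product)
--         tidsets.setdefault(product, set()).add(order)
--     candidates = dict.fromkeys(
--         pair
--         for product_set in orders.values()
--         for pair in combinations(sorted(product_set), 2)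
--     )
--     return {pair: len(tidsets[pair[0]] & tidsets[pair[1]]) for pair in candidates}
-- ===== Notes on version B (the rewrite author's own statement) =====
-- stated objective: alternative
-- what changed: B counts vertically (Eclat-style): it builds an inverted index productId -> set of orderIds and obtains each candidate pair's count as the size of a tidset intersection, instead of A's horizontal scan that increments a dict entry for every pair of every order.
import Mathlib
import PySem

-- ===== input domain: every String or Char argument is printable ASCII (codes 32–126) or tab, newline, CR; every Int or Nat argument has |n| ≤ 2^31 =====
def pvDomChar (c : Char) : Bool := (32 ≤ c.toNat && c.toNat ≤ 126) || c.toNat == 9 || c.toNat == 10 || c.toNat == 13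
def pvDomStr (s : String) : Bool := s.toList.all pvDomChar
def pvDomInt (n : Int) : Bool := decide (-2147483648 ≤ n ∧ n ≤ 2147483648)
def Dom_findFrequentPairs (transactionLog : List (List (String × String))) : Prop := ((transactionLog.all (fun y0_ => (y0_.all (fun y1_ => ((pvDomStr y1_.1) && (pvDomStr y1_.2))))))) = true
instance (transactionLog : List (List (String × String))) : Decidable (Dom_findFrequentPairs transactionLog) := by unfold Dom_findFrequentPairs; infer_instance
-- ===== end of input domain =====

-- B replaces A's per-order pair-increment counting by an inverted index (tidsets) and
-- counts each candidate pair as the size of a tidset intersection (Eclat-style); same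
-- output dict, alternative algorithm (not claimed faster).

-- ===== PORT A =====
-- itertools.combinations(l, 2) in Python's iteration order (builtin; shared by both ports)
def combs2 : List String → List (String × String)
  | [] => []
  | x :: xs => xs.map (fun y => (x, y)) ++ combs2 xs

def findFrequentPairs (transactionLog : List (List (String × String))) : List (String × String × Int) :=
  let orders : PySem.Dict String (PySem.Set String) :=
    transactionLog.foldl (fun orders transaction =>
      -- transaction['orderId'] / transaction['productId']: under Pre_ the key is present,
      -- so '.getD ""' is exact (on a missing key Python raises KeyError, excluded by Pre_)
      let order := ((PySem.Dict.mk transaction).get? "orderId").getD ""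
      let product := ((PySem.Dict.mk transaction).get? "productId").getD ""
      if orders.contains order = false then
        orders.insert order (PySem.Set.ofList [product])
      else
        orders.insert order (PySem.Set.add ((orders.get? order).getD PySem.Set.empty) product))
      PySem.Dict.empty
  let pair_counts : PySem.Dict (String × String) Int :=
    orders.values.foldl (fun pair_counts product_set =>
      if product_set.length < 2 then pair_counts
      else
        (combs2 (PySem.List.sorted product_set (fun x => x) false)).foldl
          (fun pc pair => pc.insert pair (pc.getD pair 0 + 1)) pair_counts)
      PySem.Dict.empty
  pair_counts.items.map (fun it => (it.1.1, it.1.2, it.2))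

-- ===== PORT B =====
def findFrequentPairs_alt (transactionLog : List (List (String × String))) : List (String × String × Int) :=
  let st :=
    transactionLog.foldl
      (fun (st : PySem.Dict String (PySem.Set String) × PySem.Dict String (PySem.Set String)) transaction =>
        let order := ((PySem.Dict.mk transaction).get? "orderId").getD ""
        let product := ((PySem.Dict.mk transaction).get? "productId").getD ""
        -- orders.setdefault(order, set()).add(product); tidsets.setdefault(product, set()).add(order)
        (st.1.modify order PySem.Set.empty (fun s => PySem.Set.add s product),
         st.2.modify product PySem.Set.empty (fun s => PySem.Set.add s order)))
      (PySem.Dict.empty, PySem.Dict.empty)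
  let candidates : List (String × String) :=
    PySem.List.dedup
      ((st.1.values.map (fun product_set =>
          combs2 (PySem.List.sorted product_set (fun x => x) false))).flatten)
  -- tidsets[pair[0]] / tidsets[pair[1]] always hit (every candidate product occurs), so getD is exact
  candidates.map (fun pair =>
    (pair.1, pair.2,
      ((PySem.Set.inter (st.2.getD pair.1 PySem.Set.empty)
                        (st.2.getD pair.2 PySem.Set.empty)).length : Int)))

-- ===== PRECONDITION & SPEC =====
-- Pre_ excludes only transactions missing an 'orderId' or 'productId' key, on which the
-- Python A raises KeyError (and B raises the same).
def Pre_findFrequentPairs (transactionLog : List (List (String × String))) : Prop :=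
  ∀ t ∈ transactionLog, (PySem.Dict.mk t).contains "orderId" = true ∧ (PySem.Dict.mk t).contains "productId" = true
instance (transactionLog : List (List (String × String))) : Decidable (Pre_findFrequentPairs transactionLog) := by unfold Pre_findFrequentPairs; infer_instance

def pvWitness_findFrequentPairs : (List (List (String × String))) :=
  [[("orderId", "1"), ("productId", "a")], [("orderId", "1"), ("productId", "b")]]

def Spec_findFrequentPairs (transactionLog : List (List (String × String))) (out : List (String × String × Int)) : Prop := out = findFrequentPairs_alt transactionLog
instance (transactionLog : List (List (String × String))) (out : List (String × String × Int)) : Decidable (Spec_findFrequentPairs transactionLog out) := by unfold Spec_findFrequentPairs; infer_instance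

-- ===== CLAIM (what is proved, stated in full; the proofs are below) =====
def Claim_equal_findFrequentPairs : Prop := ∀ (transactionLog : List (List (String × String))), Dom_findFrequentPairs transactionLog → Pre_findFrequentPairs transactionLog → Spec_findFrequentPairs transactionLog (findFrequentPairs transactionLog)

-- ===== LEMMAS AND PROOFS =====

-- proof-side names for the two folds of B's first loop
def pvOid (t : List (String × String)) : String := ((PySem.Dict.mk t).get? "orderId").getD ""
def pvPid (t : List (String × String)) : String := ((PySem.Dict.mk t).get? "productId").getD ""

def pvOrd (log : List (List (String × String))) : PySem.Dict String (PySem.Set String) :=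
  log.foldl (fun d t => d.modify (pvOid t) PySem.Set.empty (fun s => PySem.Set.add s (pvPid t))) PySem.Dict.empty

def pvTid (log : List (List (String × String))) : PySem.Dict String (PySem.Set String) :=
  log.foldl (fun d t => d.modify (pvPid t) PySem.Set.empty (fun s => PySem.Set.add s (pvOid t))) PySem.Dict.empty

def pvG (v : PySem.Set String) : List (String × String) :=
  combs2 (PySem.List.sorted v (fun x => x) false)

def pvF (log : List (List (String × String))) : List (String × String) :=
  ((pvOrd log).values.map pvG).flatten

lemma combs2_short {l : List String} (h : l.length < 2) : combs2 l = [] := by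
  match l, h with
  | [], _ => rfl
  | [x], _ => rfl

lemma combs2_fst_mem {l : List String} {p q : String} (h : (p, q) ∈ combs2 l) : p ∈ l := by
  induction l with
  | nil => simp [combs2] at h
  | cons x xs ih =>
    simp only [combs2, List.mem_append, List.mem_map] at h
    rcases h with ⟨y, _, hy⟩ | h
    · cases hy; simp
    · exact List.mem_cons_of_mem _ (ih h)

lemma mem_combs2 {l : List String} {p q : String} (hl : l.Pairwise (· < ·)) :
    (p, q) ∈ combs2 l ↔ p ∈ l ∧ q ∈ l ∧ p < q := by
  induction l with
  | nil => simp [combs2]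
  | cons x xs ih =>
    have hx : ∀ y ∈ xs, x < y := (List.pairwise_cons.mp hl).1
    have htl : xs.Pairwise (· < ·) := (List.pairwise_cons.mp hl).2
    simp only [combs2, List.mem_append, List.mem_map, List.mem_cons]
    constructor
    · rintro (⟨y, hy, hpq⟩ | h)
      · cases hpq
        exact ⟨Or.inl rfl, Or.inr hy, hx _ hy⟩
      · obtain ⟨hp, hq, hlt⟩ := (ih htl).mp h
        exact ⟨Or.inr hp, Or.inr hq, hlt⟩
    · rintro ⟨hp | hp, hq | hq, hlt⟩
      · exact absurd hlt (by simp [hp, hq])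
      · exact Or.inl ⟨q, hq, by simp [hp]⟩
      · exact absurd hlt (not_lt.mpr (le_of_lt (hq ▸ hx _ hp)))
      · exact Or.inr ((ih htl).mpr ⟨hp, hq, hlt⟩)

lemma nodup_combs2 {l : List String} (hl : l.Pairwise (· < ·)) : (combs2 l).Nodup := by
  induction l with
  | nil => simp [combs2]
  | cons x xs ih =>
    have hx : ∀ y ∈ xs, x < y := (List.pairwise_cons.mp hl).1
    have htl : xs.Pairwise (· < ·) := (List.pairwise_cons.mp hl).2
    have hnodupxs : xs.Nodup := htl.imp (fun h => ne_of_lt h)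
    refine List.Nodup.append ?_ (ih htl) ?_
    · exact hnodupxs.map (fun a b h => by simpa using congrArg Prod.snd h)
    · intro pr hpr1 hpr2
      obtain ⟨y, hy, rfl⟩ := List.mem_map.mp hpr1
      exact absurd (combs2_fst_mem hpr2) (fun hmem => lt_irrefl x (hx x hmem))

lemma sorted_pairwise_lt {v : List String} (hv : v.Nodup) :
    (PySem.List.sorted v (fun x => x) false).Pairwise (· < ·) := by
  have h1 : (PySem.List.sorted v (fun x => x) false).Pairwise (· ≤ ·) := by
    simpa using PySem.List.sorted_pairwise (xs := v) (key := fun x => x)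
  have h2 : (PySem.List.sorted v (fun x => x) false).Nodup :=
    (PySem.List.sorted_perm (xs := v) (key := fun x => x) (rev := false)).nodup_iff.mpr hv
  exact (h1.and h2).imp (fun h => lt_of_le_of_ne h.1 h.2)

lemma foldl_pair {α β γ : Type} (l : List γ) (f : α → γ → α) (g : β → γ → β) (a : α) (b : β) :
    l.foldl (fun st t => (f st.1 t, g st.2 t)) (a, b) = (l.foldl f a, l.foldl g b) := by
  induction l generalizing a b with
  | nil => rfl
  | cons t rest ih => simp only [List.foldl_cons]; exact ih _ _

-- the two components of B's first loop, as separate folds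
lemma bfold_eq (log : List (List (String × String))) :
    (log.foldl
      (fun (st : PySem.Dict String (PySem.Set String) × PySem.Dict String (PySem.Set String)) transaction =>
        let order := ((PySem.Dict.mk transaction).get? "orderId").getD ""
        let product := ((PySem.Dict.mk transaction).get? "productId").getD ""
        (st.1.modify order PySem.Set.empty (fun s => PySem.Set.add s product),
         st.2.modify product PySem.Set.empty (fun s => PySem.Set.add s order)))
      (PySem.Dict.empty, PySem.Dict.empty))
    = (pvOrd log, pvTid log) := by
  unfold pvOrd pvTid
  exact foldl_pair log
    (fun d t => d.modify (pvOid t) PySem.Set.empty (fun s => PySem.Set.add s (pvPid t)))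
    (fun e t => e.modify (pvPid t) PySem.Set.empty (fun s => PySem.Set.add s (pvOid t)))
    PySem.Dict.empty PySem.Dict.empty

-- A's first loop builds the same orders dict as B's setdefault/add loop
lemma afold_eq (log : List (List (String × String))) :
    log.foldl (fun orders transaction =>
      let order := ((PySem.Dict.mk transaction).get? "orderId").getD ""
      let product := ((PySem.Dict.mk transaction).get? "productId").getD ""
      if orders.contains order = false then
        orders.insert order (PySem.Set.ofList [product])
      else
        orders.insert order (PySem.Set.add ((orders.get? order).getD PySem.Set.empty) product))
      PySem.Dict.empty = pvOrd log := by
  unfold pvOrd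
  congr 1
  funext d t
  show (if d.contains (pvOid t) = false then
          d.insert (pvOid t) (PySem.Set.ofList [pvPid t])
        else
          d.insert (pvOid t) (PySem.Set.add ((d.get? (pvOid t)).getD PySem.Set.empty) (pvPid t)))
      = d.modify (pvOid t) PySem.Set.empty (fun s => PySem.Set.add s (pvPid t))
  by_cases h : d.contains (pvOid t) = true
  · rw [if_neg (by simp [h])]
    show _ = d.insert (pvOid t) (PySem.Set.add (d.getD (pvOid t) PySem.Set.empty) (pvPid t))
    rw [PySem.Dict.getD_eq_get?_getD]
  · rw [if_pos (by simpa using h)]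
    show _ = d.insert (pvOid t) (PySem.Set.add (d.getD (pvOid t) PySem.Set.empty) (pvPid t))
    rw [PySem.Dict.getD_of_not_contains _ _ (by simpa using h)]
    rfl

-- A's counting loop is the counter of the flattened candidate-pair lists
lemma pairCounts_eq_counter (vs : List (PySem.Set String)) :
    vs.foldl (fun pair_counts product_set =>
      if product_set.length < 2 then pair_counts
      else
        (combs2 (PySem.List.sorted product_set (fun x => x) false)).foldl
          (fun pc pair => pc.insert pair (pc.getD pair 0 + 1)) pair_counts)
      PySem.Dict.empty
    = PySem.Dict.counter ((vs.map pvG).flatten) := by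
  rw [← PySem.Dict.foldl_insert_getD_add_one_eq_counter, List.foldl_flatten, List.foldl_map]
  congr 1
  funext pc v
  split_ifs with h
  · have hnil : pvG v = [] := by
      unfold pvG
      exact combs2_short (by simpa [PySem.List.length_sorted] using h)
    rw [hnil]
    rfl
  · simp only [pvG]

-- invariant tying the orders dict and the inverted index together
def pvInv (d e : PySem.Dict String (PySem.Set String)) : Prop :=
  d.keys.Nodup ∧ (∀ o, (d.getD o PySem.Set.empty).Nodup) ∧
  (∀ p, (e.getD p PySem.Set.empty).Nodup) ∧
  (∀ p o, o ∈ e.getD p PySem.Set.empty ↔ d.contains o = true ∧ p ∈ d.getD o PySem.Set.empty)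

lemma pvInv_step (d e : PySem.Dict String (PySem.Set String)) (o₀ p₀ : String) (h : pvInv d e) :
    pvInv (d.modify o₀ PySem.Set.empty (fun s => PySem.Set.add s p₀))
          (e.modify p₀ PySem.Set.empty (fun s => PySem.Set.add s o₀)) := by
  obtain ⟨hdk, hdv, hev, hc⟩ := h
  refine ⟨?_, ?_, ?_, ?_⟩
  · show (d.insert o₀ _).keys.Nodup
    by_cases hco : d.contains o₀ = true
    · rw [PySem.Dict.keys_insert_of_contains _ _ hco]; exact hdk
    · rw [PySem.Dict.keys_insert_of_not_contains _ _ (by simpa using hco)]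
      refine List.Nodup.append hdk (List.nodup_singleton _) ?_
      intro x hx hx'
      rw [List.mem_singleton] at hx'
      rw [hx'] at hx
      exact absurd ((PySem.Dict.contains_iff_mem_keys d o₀).mpr hx) (by simpa using hco)
  · intro o
    rw [PySem.Dict.getD_modify]
    split_ifs with ho
    · exact PySem.Set.nodup_add _ _ (hdv o₀)
    · exact hdv o
  · intro p
    rw [PySem.Dict.getD_modify]
    split_ifs with hp
    · exact PySem.Set.nodup_add _ _ (hev p₀)
    · exact hev p
  · intro p o
    rw [PySem.Dict.getD_modify, PySem.Dict.getD_modify, PySem.Dict.contains_modify]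
    by_cases hp : p = p₀ <;> by_cases ho : o = o₀
    · rw [if_pos hp, if_pos ho, hp, ho]
      simp [PySem.Set.mem_add]
    · rw [if_pos hp, if_neg ho, hp]
      rw [PySem.Set.mem_add, hc p₀ o]
      simp [ho]
    · rw [if_neg hp, if_pos ho, ho]
      rw [hc p o₀]
      by_cases hco : d.contains o₀ = true
      · simp [hco, PySem.Set.mem_add, hp]
      · rw [PySem.Dict.getD_of_not_contains _ _ (by simpa using hco)]
        simp [hco, hp, PySem.Set.empty]
    · rw [if_neg hp, if_neg ho]
      have hb : (o == o₀) = false := by simpa using ho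
      rw [hb, Bool.false_or]
      exact hc p o

lemma pvInv_fold (log : List (List (String × String))) (d e : PySem.Dict String (PySem.Set String))
    (h : pvInv d e) :
    pvInv (log.foldl (fun d t => d.modify (pvOid t) PySem.Set.empty (fun s => PySem.Set.add s (pvPid t))) d)
          (log.foldl (fun d t => d.modify (pvPid t) PySem.Set.empty (fun s => PySem.Set.add s (pvOid t))) e) := by
  induction log generalizing d e with
  | nil => exact h
  | cons t rest ih =>
    simp only [List.foldl_cons]
    exact ih _ _ (pvInv_step d e (pvOid t) (pvPid t) h)

lemma pvInv_pv (log : List (List (String × String))) : pvInv (pvOrd log) (pvTid log) := by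
  unfold pvOrd pvTid
  refine pvInv_fold log _ _ ⟨?_, ?_, ?_, ?_⟩
  · exact List.nodup_nil
  · intro o; simp [PySem.Dict.getD_empty, PySem.Set.empty]
  · intro p; simp [PySem.Dict.getD_empty, PySem.Set.empty]
  · intro p o; simp [PySem.Dict.getD_empty, PySem.Dict.contains_empty, PySem.Set.empty]

-- the count of a pair (p, q), p < q, in the flattened candidate lists is the number of
-- product sets containing both p and q
lemma count_pvG_flatten (vs : List (PySem.Set String)) (p q : String) (hpq : p < q)
    (hnd : ∀ v ∈ vs, v.Nodup) :
    ((vs.map pvG).flatten).count (p, q)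
      = vs.countP (fun v => decide (p ∈ v) && decide (q ∈ v)) := by
  induction vs with
  | nil => rfl
  | cons v rest ih =>
    have hv : v.Nodup := hnd v List.mem_cons_self
    have hrest := ih (fun w hw => hnd w (List.mem_cons_of_mem _ hw))
    have hsl := sorted_pairwise_lt hv
    simp only [List.map_cons, List.flatten_cons, List.count_append, List.countP_cons, hrest]
    by_cases hm : p ∈ v ∧ q ∈ v
    · have hmem : (p, q) ∈ pvG v := by
        unfold pvG
        exact (mem_combs2 hsl).mpr
          ⟨(PySem.List.mem_sorted ..).mpr hm.1, (PySem.List.mem_sorted ..).mpr hm.2, hpq⟩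
      have hone : (pvG v).count (p, q) = 1 := by
        unfold pvG at hmem ⊢
        exact List.count_eq_one_of_mem (nodup_combs2 hsl) hmem
      simp [hone, hm.1, hm.2]
      omega
    · have hnm : (p, q) ∉ pvG v := by
        intro hmem
        unfold pvG at hmem
        obtain ⟨h1, h2, _⟩ := (mem_combs2 hsl).mp hmem
        exact hm ⟨(PySem.List.mem_sorted ..).mp h1, (PySem.List.mem_sorted ..).mp h2⟩
      have hzero : (pvG v).count (p, q) = 0 := List.count_eq_zero_of_not_mem hnm
      have hfalse : ¬ (decide (p ∈ v) && decide (q ∈ v)) = true := by simpa using hm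
      simp [hzero, hfalse]

lemma pvF_mem_lt {log : List (List (String × String))} {pr : String × String}
    (h : pr ∈ pvF log) : pr.1 < pr.2 := by
  obtain ⟨hdk, hdv, _, _⟩ := pvInv_pv log
  unfold pvF at h
  rw [List.mem_flatten] at h
  obtain ⟨L, hL, hpr⟩ := h
  rw [List.mem_map] at hL
  obtain ⟨v, hv, rfl⟩ := hL
  have hvnd : v.Nodup := by
    rw [PySem.Dict.values_eq_map_keys _ hdk PySem.Set.empty] at hv
    obtain ⟨o, _, rfl⟩ := List.mem_map.mp hv
    exact hdv o
  obtain ⟨p, q⟩ := pr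
  exact ((mem_combs2 (sorted_pairwise_lt hvnd)).mp hpr).2.2

-- the key fact: A's accumulated count equals the size of B's tidset intersection
lemma count_eq_inter_len (log : List (List (String × String))) (p q : String) (hpq : p < q) :
    (pvF log).count (p, q)
      = (PySem.Set.inter ((pvTid log).getD p PySem.Set.empty)
                         ((pvTid log).getD q PySem.Set.empty)).length := by
  obtain ⟨hdk, hdv, hev, hc⟩ := pvInv_pv log
  have hvals : (pvOrd log).values = (pvOrd log).keys.map (fun o => (pvOrd log).getD o PySem.Set.empty) :=
    PySem.Dict.values_eq_map_keys _ hdk _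
  have hvnd : ∀ v ∈ (pvOrd log).values, v.Nodup := by
    rw [hvals]
    intro v hv
    obtain ⟨o, _, rfl⟩ := List.mem_map.mp hv
    exact hdv o
  have h1 : (pvF log).count (p, q)
      = (pvOrd log).values.countP (fun v => decide (p ∈ v) && decide (q ∈ v)) :=
    count_pvG_flatten _ p q hpq hvnd
  have h2 : (pvOrd log).values.countP (fun v => decide (p ∈ v) && decide (q ∈ v))
      = ((pvOrd log).keys.filter (fun o =>
          decide (p ∈ (pvOrd log).getD o PySem.Set.empty) &&
          decide (q ∈ (pvOrd log).getD o PySem.Set.empty))).length := by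
    rw [hvals, List.countP_map, List.countP_eq_length_filter]
    rfl
  have hperm : (PySem.Set.inter ((pvTid log).getD p PySem.Set.empty)
                  ((pvTid log).getD q PySem.Set.empty)).Perm
      ((pvOrd log).keys.filter (fun o =>
          decide (p ∈ (pvOrd log).getD o PySem.Set.empty) &&
          decide (q ∈ (pvOrd log).getD o PySem.Set.empty))) := by
    refine (List.perm_ext_iff_of_nodup ?_ ?_).mpr ?_
    · exact PySem.Set.nodup_inter _ _ (hev p)
    · exact hdk.filter _
    · intro o
      rw [PySem.Set.mem_inter, List.mem_filter, hc p o, hc q o]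
      simp only [Bool.and_eq_true, decide_eq_true_eq, ← PySem.Dict.contains_iff_mem_keys]
      tauto
  rw [h1, h2, hperm.length_eq]

lemma main_eq (log : List (List (String × String))) :
    findFrequentPairs log = findFrequentPairs_alt log := by
  unfold findFrequentPairs findFrequentPairs_alt
  simp only [bfold_eq, afold_eq]
  rw [pairCounts_eq_counter, PySem.Dict.items_counter, PySem.List.dedup_eq_ofList, List.map_map]
  rw [show (fun (product_set : PySem.Set String) =>
        combs2 (PySem.List.sorted product_set (fun x => x) false)) = pvG from rfl]
  apply List.map_congr_left
  intro k hk
  have hkF : k ∈ pvF log := (PySem.Set.mem_ofList ..).mp hk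
  have hpq : k.1 < k.2 := pvF_mem_lt hkF
  obtain ⟨p, q⟩ := k
  simp only [Function.comp_apply]
  have := count_eq_inter_len log p q hpq
  simp [pvF] at this
  simp [this]

-- ===== VERDICT (by name: the statement is the Claim_ definition above) =====
theorem findFrequentPairs_spec : Claim_equal_findFrequentPairs := by
  intro log _ _
  unfold Spec_findFrequentPairs
  exact main_eq log
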